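-- pv_equiv track=rewrite | github.com/Darwinky25/DARWIN-with-ALLA-engine | visual_semantic_translator.py | _is_horizontal_line
-- ===== SOURCE A (Python) =====
-- from typing import Dict, List, Tuple, Any, Optional
--
-- def _is_horizontal_line(positions: List[Tuple[int, int]]) -> bool:
--     """Check if positions form a horizontal line"""
--     if len(positions) < 2:
--         return False
--
--     rows = [pos[0] for pos in positions]
--     cols = [pos[1] for pos in positions]
--
--     # All same row, consecutive columns
--     if len(set(rows)) == 1:
--         cols_sorted = sorted(cols)
--         return all(cols_sorted[i+1] - cols_sorted[i] == 1 for i in range(len(cols_sorted)-1))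
--
--     return False
-- ===== SOURCE B (Python) =====
-- def _is_horizontal_line(positions):
--     """Check if positions form a horizontal line"""
--     if len(positions) < 2:
--         return False
--     rows = {pos[0] for pos in positions}
--     if len(rows) != 1:
--         return False
--     cols = [pos[1] for pos in positions]
--     return len(set(cols)) == len(cols) and max(cols) - min(cols) == len(cols) - 1
-- ===== Notes on version B (the rewrite author's own statement) =====
-- stated objective: simpler
-- what changed: Replaced the sort-then-adjacent-difference scan with an O(n) arithmetic test: columns are consecutive iff they are distinct and max-min equals count-1.
import Mathlib
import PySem

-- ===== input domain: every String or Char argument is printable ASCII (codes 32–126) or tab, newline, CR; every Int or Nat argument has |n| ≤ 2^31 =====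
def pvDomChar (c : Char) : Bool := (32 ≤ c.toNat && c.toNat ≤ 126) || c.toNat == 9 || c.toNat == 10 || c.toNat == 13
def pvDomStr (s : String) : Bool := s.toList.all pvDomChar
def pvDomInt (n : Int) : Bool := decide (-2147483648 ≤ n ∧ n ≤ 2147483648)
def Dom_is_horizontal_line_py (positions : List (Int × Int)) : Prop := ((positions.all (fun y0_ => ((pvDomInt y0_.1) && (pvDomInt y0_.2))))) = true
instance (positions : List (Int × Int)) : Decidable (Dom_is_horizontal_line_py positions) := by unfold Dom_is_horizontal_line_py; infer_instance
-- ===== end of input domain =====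

-- B replaces A's sort-then-adjacent-difference scan by the O(n) test
-- "columns distinct and max - min = count - 1" (simpler, no sorting).

-- ===== PORT A =====
def is_horizontal_line_py (positions : List (Int × Int)) : Bool :=
  if positions.length < 2 then false
  else
    let rows := positions.map (fun p => p.1)
    let cols := positions.map (fun p => p.2)
    if (PySem.Set.ofList rows).length = 1 then
      let cols_sorted := PySem.List.sorted cols (fun x => x)
      (PySem.List.pyRange 0 ((cols_sorted.length : Int) - 1)).all
        (fun i => PySem.List.pyGetD cols_sorted (i + 1) 0 - PySem.List.pyGetD cols_sorted i 0 == 1)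
    else false

-- ===== PORT B =====
def is_horizontal_line_py_alt (positions : List (Int × Int)) : Bool :=
  if positions.length < 2 then false
  else
    let rows := PySem.Set.ofList (positions.map (fun p => p.1))
    if rows.length ≠ 1 then false
    else
      let cols := positions.map (fun p => p.2)
      decide ((PySem.Set.ofList cols).length = cols.length) &&
        ((PySem.List.max? cols (fun x => x)).getD 0 - (PySem.List.min? cols (fun x => x)).getD 0
          == (cols.length : Int) - 1)

-- ===== PRECONDITION & SPEC =====
def Spec_is_horizontal_line_py (positions : List (Int × Int)) (out : Bool) : Prop := out = is_horizontal_line_py_alt positions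
instance (positions : List (Int × Int)) (out : Bool) : Decidable (Spec_is_horizontal_line_py positions out) := by unfold Spec_is_horizontal_line_py; infer_instance

-- ===== CLAIM (what is proved, stated in full; the proofs are below) =====
def Claim_equal_is_horizontal_line_py : Prop := ∀ (positions : List (Int × Int)), Dom_is_horizontal_line_py positions → Spec_is_horizontal_line_py positions (is_horizontal_line_py positions)

-- ===== LEMMAS AND PROOFS =====

-- set(xs) (first-occurrence order) is a sublist of xs
theorem pv_foldl_add_sublist {α : Type} [BEq α] (xs : List α) :
    ∀ acc : List α, ∃ ys : List α, xs.foldl PySem.Set.add acc = acc ++ ys ∧ ys.Sublist xs := by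
  induction xs with
  | nil => intro acc; exact ⟨[], by simp⟩
  | cons x t ih =>
    intro acc
    simp only [List.foldl_cons, PySem.Set.add]
    by_cases hx : PySem.Set.contains acc x = true
    · rw [if_pos hx]
      obtain ⟨ys, h1, h2⟩ := ih acc
      exact ⟨ys, h1, h2.cons x⟩
    · rw [if_neg hx]
      obtain ⟨ys, h1, h2⟩ := ih (acc ++ [x])
      exact ⟨x :: ys, by simpa using h1, h2.cons₂ x⟩

theorem pv_ofList_sublist {α : Type} [BEq α] (xs : List α) :
    (PySem.Set.ofList xs).Sublist xs := by
  obtain ⟨ys, h1, h2⟩ := pv_foldl_add_sublist xs []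
  rw [PySem.Set.ofList_eq_foldl, h1]; simpa using h2

theorem pv_ofList_len_iff {α : Type} [BEq α] [LawfulBEq α] (xs : List α) :
    (PySem.Set.ofList xs).length = xs.length ↔ xs.Nodup := by
  constructor
  · intro h
    have := (pv_ofList_sublist xs).eq_of_length h
    rw [← this]; exact PySem.Set.nodup_ofList xs
  · intro h; rw [PySem.Set.ofList_eq_self_of_nodup xs h]

-- gap lemma for a monotone duplicate-free list: indices d apart differ by ≥ d
theorem pv_gap (s : List Int) (hnd : s.Nodup)
    (hmono : ∀ p q : ℕ, (hpq : p ≤ q) → (hq : q < s.length) → s[p]'(by omega) ≤ s[q]) :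
    ∀ (d i : ℕ) (h : i + d < s.length), (s[i]'(by omega)) + (d : Int) ≤ s[i + d]'h := by
  intro d
  induction d with
  | zero => intro i h; simp
  | succ d ih =>
    intro i h
    have h1 : i + d < s.length := by omega
    have hle := ih i h1
    have hm := hmono (i + d) (i + d + 1) (by omega) (by omega)
    have hne : s[i + d]'h1 ≠ s[i + d + 1]'(by omega) := by
      intro heq
      exact absurd (hnd.getElem_inj_iff.mp heq) (by omega)
    have heq : i + (d + 1) = i + d + 1 := by omega
    rw [getElem_congr rfl heq]
    push_cast
    omega

-- under the adjacent-difference-1 chain, every element is head + index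
theorem pv_chain_formula (cs : List Int)
    (h : ∀ k (hk : k + 1 < cs.length), cs[k + 1] = (cs[k]'(by omega)) + 1) :
    ∀ i (hi : i < cs.length), cs[i] = (cs[0]'(by omega)) + (i : Int) := by
  intro i
  induction i with
  | zero => intro hi; simp
  | succ i ih =>
    intro hi
    have h1 : i < cs.length := by omega
    rw [h i hi, ih h1]
    push_cast; ring

-- the B-side max (resp. min) of cols is the last (resp. first) element of the sorted list
theorem pv_max_eq (cols s : List Int) (hperm : s.Perm cols)
    (hmono : ∀ p q : ℕ, (hpq : p ≤ q) → (hq : q < s.length) → s[p]'(by omega) ≤ s[q]) (M : Int)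
    (hM : PySem.List.max? cols (fun x => x) = some M)
    (h : s.length - 1 < s.length) :
    M = s[s.length - 1]'h := by
  have hlast_mem : s[s.length - 1] ∈ cols := hperm.mem_iff.mp (List.getElem_mem h)
  have h1 : s[s.length - 1] ≤ M := PySem.List.max?_isMax hM _ hlast_mem
  have hMmem : M ∈ s := hperm.mem_iff.mpr (PySem.List.max?_mem hM)
  obtain ⟨k, hk, hkM⟩ := List.getElem_of_mem hMmem
  have h2 : M ≤ s[s.length - 1] := by
    rw [← hkM]
    exact hmono k (s.length - 1) (by omega) h
  omega

theorem pv_min_eq (cols s : List Int) (hperm : s.Perm cols)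
    (hmono : ∀ p q : ℕ, (hpq : p ≤ q) → (hq : q < s.length) → s[p]'(by omega) ≤ s[q]) (m : Int)
    (hm : PySem.List.min? cols (fun x => x) = some m)
    (h : 0 < s.length) :
    m = s[0]'h := by
  have hhead_mem : s[0] ∈ cols := hperm.mem_iff.mp (List.getElem_mem h)
  have h1 : m ≤ s[0] := PySem.List.min?_isMin hm _ hhead_mem
  have hmmem : m ∈ s := hperm.mem_iff.mpr (PySem.List.min?_mem hm)
  obtain ⟨k, hk, hkm⟩ := List.getElem_of_mem hmmem
  have h2 : s[0] ≤ m := by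
    rw [← hkm]
    exact hmono 0 k (by omega) hk
  omega

-- the core equivalence: adjacent differences all 1 on the sorted list
-- iff the original list is duplicate-free and max - min = length - 1
theorem pv_core (cols s : List Int) (hlen : 2 ≤ cols.length) (hperm : s.Perm cols)
    (hmono : ∀ p q : ℕ, (hpq : p ≤ q) → (hq : q < s.length) → s[p]'(by omega) ≤ s[q]) (M m : Int)
    (hM : PySem.List.max? cols (fun x => x) = some M)
    (hm : PySem.List.min? cols (fun x => x) = some m) :
    ((∀ k (hk : k + 1 < s.length), s[k + 1] = (s[k]'(by omega)) + 1)
      ↔ (cols.Nodup ∧ M - m = (cols.length : Int) - 1)) := by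
  have hlens : s.length = cols.length := hperm.length_eq
  have hpos : 0 < s.length := by omega
  have hlast : s.length - 1 < s.length := by omega
  have hMeq := pv_max_eq cols s hperm hmono M hM hlast
  have hmeq := pv_min_eq cols s hperm hmono m hm hpos
  constructor
  · intro hchain
    have hform := pv_chain_formula s hchain
    have hlt : s.Pairwise (· < ·) := by
      rw [List.pairwise_iff_getElem]
      intro i j hi hj hij
      rw [hform i (by omega), hform j hj]
      omega
    have hnds : s.Nodup := hlt.imp (fun h => ne_of_lt h)
    refine ⟨hperm.symm.nodup_iff.mpr hnds, ?_⟩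
    rw [hMeq, hmeq, hform (s.length - 1) hlast, hform 0 hpos]
    omega
  · rintro ⟨hnd, hspan⟩
    have hnds : s.Nodup := hperm.nodup_iff.mpr hnd
    intro k hk
    have hgap := pv_gap s hnds hmono
    have hadj := hgap 1 k hk
    by_contra hne2
    -- then s[k+1] ≥ s[k] + 2, and the gap lemma forces max - min ≥ length
    have h2 : (s[k]'(by omega)) + 2 ≤ s[k + 1] := by
      have := hadj; push_cast at this; omega
    have hk0 := hgap k 0 (by omega)
    have hktop := hgap (s.length - 1 - (k + 1)) (k + 1) (by omega)
    rw [getElem_congr rfl (show k + 1 + (s.length - 1 - (k + 1)) = s.length - 1 from by omega)] at hktop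
    rw [hMeq, hmeq] at hspan
    simp only [Nat.zero_add] at hk0
    omega

-- unfold A's inner all into the chain condition
theorem pv_all_iff (s : List Int) :
    ((PySem.List.pyRange 0 ((s.length : Int) - 1)).all
        (fun i => PySem.List.pyGetD s (i + 1) 0 - PySem.List.pyGetD s i 0 == 1) = true)
      ↔ (∀ k (hk : k + 1 < s.length), s[k + 1] = (s[k]'(by omega)) + 1) := by
  rw [List.all_eq_true]
  constructor
  · intro h k hk
    have hmem : (k : Int) ∈ PySem.List.pyRange 0 ((s.length : Int) - 1) :=
      PySem.List.mem_pyRange_one.mpr ⟨by positivity, by omega⟩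
    have := h _ hmem
    rw [beq_iff_eq] at this
    rw [PySem.List.pyGetD_eq_getElem s 0 (by positivity) (by omega),
        PySem.List.pyGetD_eq_getElem s 0 (by positivity) (by omega)] at this
    have h1 : ((k : Int) + 1).toNat = k + 1 := by omega
    have h2 : ((k : Int)).toNat = k := by omega
    rw [getElem_congr rfl h1, getElem_congr rfl h2] at this
    omega
  · intro h i hmem
    obtain ⟨h0, h1⟩ := PySem.List.mem_pyRange_one.mp hmem
    rw [beq_iff_eq]
    rw [PySem.List.pyGetD_eq_getElem s 0 (by omega) (by omega),
        PySem.List.pyGetD_eq_getElem s 0 (by omega) (by omega)]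
    have hk : i.toNat + 1 < s.length := by omega
    have := h i.toNat hk
    rw [getElem_congr rfl (show (i + 1).toNat = i.toNat + 1 from by omega)]
    omega

-- ===== VERDICT (by name: the statement is the Claim_ definition above) =====
theorem is_horizontal_line_py_spec : Claim_equal_is_horizontal_line_py := by
  intro positions _
  unfold Spec_is_horizontal_line_py is_horizontal_line_py is_horizontal_line_py_alt
  by_cases hlen : positions.length < 2
  · rw [if_pos hlen, if_pos hlen]
  · rw [if_neg hlen, if_neg hlen]
    set rows := positions.map (fun p => p.1) with hrows
    set cols := positions.map (fun p => p.2) with hcols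
    by_cases hrow : (PySem.Set.ofList rows).length = 1
    · rw [if_pos hrow, if_neg (by simpa using hrow)]
      have hclen : 2 ≤ cols.length := by
        simp only [hcols, List.length_map]; omega
      have hne : cols ≠ [] := by intro h; rw [h] at hclen; simp at hclen
      obtain ⟨M, hM⟩ := Option.ne_none_iff_exists'.mp
        (fun h => hne ((PySem.List.max?_eq_none_iff cols (fun x : Int => x)).mp h))
      obtain ⟨m, hm⟩ := Option.ne_none_iff_exists'.mp
        (fun h => hne ((PySem.List.min?_eq_none_iff cols (fun x : Int => x)).mp h))
      set s := PySem.List.sorted cols (fun x => x) with hs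
      have hperm : s.Perm cols := PySem.List.sorted_perm cols (fun x => x) false
      have hmono : ∀ p q : ℕ, (hpq : p ≤ q) → (hq : q < s.length) → s[p]'(by omega) ≤ s[q] :=
        fun p q hpq hq => PySem.List.sorted_id_getElem_mono cols hpq hq
      have hcore := pv_core cols s hclen hperm hmono M m hM hm
      have hall := pv_all_iff s
      simp only [hM, hm, Option.getD_some]
      by_cases hres : (∀ k (hk : k + 1 < s.length), s[k + 1] = (s[k]'(by omega)) + 1)
      · rw [hall.mpr hres]
        obtain ⟨hnd, hspan⟩ := hcore.mp hres
        rw [← pv_ofList_len_iff cols] at hnd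
        simp [hnd, hspan]
      · rw [Bool.eq_iff_iff]
        constructor
        · intro h; exact absurd (hall.mp h) hres
        · intro h
          simp only [Bool.and_eq_true, decide_eq_true_eq, beq_iff_eq] at h
          obtain ⟨h1, h2⟩ := h
          exact absurd (hcore.mpr ⟨(pv_ofList_len_iff cols).mp h1, h2⟩) hres
    · rw [if_neg hrow, if_pos (by simpa using hrow)]
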